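-- pv_equiv track=rewrite | github.com/UWPCE-PythonCert-ClassRepos/Self_Paced-Online | students/RoyC/Lesson04/trigram.py | create_trigram_dict
-- ===== SOURCE A (Python) =====
-- def create_trigram_dict(word_list):
--     """
--     Create and return a trigram dict from the given word list, which is a dict
--     with a key of a two-word string and the list of words that follow it in the list
--     """
--     trigram_dict = dict()
--     # iterate through word list, adding each word to the dict array associated with the
--     # key based on the previous two words
--     for i in range(len(word_list)-2):
--         word_pair = " ".join(word_list[i:i+2])
--         trigram_list = trigram_dict.setdefault(word_pair, [])
--         if not word_list[i+2] in trigram_list: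
--             trigram_list.append(word_list[i+2])
--     return trigram_dict
-- ===== SOURCE B (Python) =====
-- def create_trigram_dict(word_list):
--     """
--     Create and return a trigram dict from the given word list: key = two-word
--     string, value = list of distinct following words in first-occurrence order.
--     Grouping strategy: list the distinct two-word keys in order of first
--     appearance, then for each key rescan the triples to collect its followers.
--     """
--     triples = list(zip(word_list, word_list[1:], word_list[2:]))
--     keys = list(dict.fromkeys(" ".join((a, b)) for a, b, _ in triples))
--     return {k: list(dict.fromkeys(c for a, b, c in triples
--                                   if " ".join((a, b)) == k))
--             for k in keys}
-- ===== Notes on version B (the rewrite author's own statement) =====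
-- stated objective: alternative
-- what changed: A accumulates a dict in one pass with setdefault and inline membership dedup; B has no mutable dict accumulator at all: it first lists the distinct two-word keys in first-appearance order, then for each key rescans the zipped triples to collect its distinct followers (group-by-key via per-key scans, O(k*n) instead of A's single-pass O(n*m)).
import Mathlib
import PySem

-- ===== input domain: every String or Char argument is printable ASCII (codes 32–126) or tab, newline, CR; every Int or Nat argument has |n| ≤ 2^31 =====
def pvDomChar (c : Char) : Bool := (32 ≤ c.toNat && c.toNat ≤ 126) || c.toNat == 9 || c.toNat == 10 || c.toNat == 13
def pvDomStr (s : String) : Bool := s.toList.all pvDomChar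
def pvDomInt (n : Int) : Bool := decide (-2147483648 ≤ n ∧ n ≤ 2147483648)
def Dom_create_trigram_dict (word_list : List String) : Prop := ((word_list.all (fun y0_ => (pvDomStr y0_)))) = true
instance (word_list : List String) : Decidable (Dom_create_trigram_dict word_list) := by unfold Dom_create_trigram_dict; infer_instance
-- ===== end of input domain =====

-- B replaces A's one-pass mutable-dict accumulation with a group-by decomposition:
-- list the distinct two-word keys in first-appearance order, then rescan the triples
-- once per key for its distinct followers; an alternative algorithm, not claimed faster.

-- ===== PORT A =====
def create_trigram_dict (word_list : List String) : List (String × List String) :=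
  ((PySem.List.pyRange 0 ((word_list.length : Int) - 2) 1).foldl
    (fun d i =>
      let word_pair := PySem.Str.join " " (PySem.List.slice word_list (some i) (some (i + 2)))
      let d1 := d.setdefault word_pair []
      let trigram_list := d1.getD word_pair []
      if PySem.List.pyGetD word_list (i + 2) "" ∈ trigram_list then d1
      else d1.insert word_pair (trigram_list ++ [PySem.List.pyGetD word_list (i + 2) ""]))
    PySem.Dict.empty).items

-- ===== PORT B =====
def create_trigram_dict_alt (word_list : List String) : List (String × List String) :=
  let triples := word_list.zip ((PySem.List.slice word_list (some 1) none).zip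
                                (PySem.List.slice word_list (some 2) none))
  let keys := PySem.List.dedup (triples.map (fun t => PySem.Str.join " " [t.1, t.2.1]))
  keys.map (fun k =>
    (k, PySem.List.dedup
          ((triples.filter (fun t => PySem.Str.join " " [t.1, t.2.1] == k)).map
            (fun t => t.2.2))))

-- ===== PRECONDITION & SPEC =====
def Spec_create_trigram_dict (word_list : List String) (out : List (String × List String)) : Prop := out = create_trigram_dict_alt word_list
instance (word_list : List String) (out : List (String × List String)) : Decidable (Spec_create_trigram_dict word_list out) := by unfold Spec_create_trigram_dict; infer_instance

-- ===== CLAIM (what is proved, stated in full; the proofs are below) =====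
def Claim_equal_create_trigram_dict : Prop := ∀ (word_list : List String), Dom_create_trigram_dict word_list → Spec_create_trigram_dict word_list (create_trigram_dict word_list)

-- ===== LEMMAS AND PROOFS =====

def tKey (t : String × String × String) : String := PySem.Str.join " " [t.1, t.2.1]

def foll (ts : List (String × String × String)) (k : String) : List String :=
  (ts.filter (fun t => tKey t == k)).map (fun t => t.2.2)

def gItems (ts : List (String × String × String)) : List (String × List String) :=
  (PySem.List.dedup (ts.map tKey)).map (fun k => (k, PySem.List.dedup (foll ts k)))

def trigStepA (d : PySem.Dict String (List String)) (t : String × String × String) :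
    PySem.Dict String (List String) :=
  let key := tKey t
  let d1 := d.setdefault key []
  let l := d1.getD key []
  if t.2.2 ∈ l then d1 else d1.insert key (l ++ [t.2.2])

theorem dedup_append_elt {α : Type} [BEq α] (l : List α) (x : α) :
    PySem.List.dedup (l ++ [x]) = PySem.Set.add (PySem.List.dedup l) x := by
  simp [PySem.List.dedup, PySem.Set.ofList, List.foldl_append]

theorem dedup_append_singleton {α : Type} [BEq α] [LawfulBEq α] (v : List α) (c : α) :
    PySem.List.dedup (v ++ [c]) =
      if c ∈ v then PySem.List.dedup v else PySem.List.dedup v ++ [c] := by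
  rw [dedup_append_elt]
  simp only [PySem.Set.add]
  have hmem : PySem.Set.contains (PySem.List.dedup v) c = true ↔ c ∈ v := by
    simp only [PySem.Set.contains, List.contains_iff_mem]
    exact PySem.List.mem_dedup v c
  by_cases hc : c ∈ v
  · rw [if_pos (hmem.mpr hc)]; simp [hc]
  · rw [if_neg (fun h => hc (hmem.mp h))]; simp [hc]

theorem ofList_append_singleton {α : Type} [BEq α] [LawfulBEq α] (v : List α) (c : α) :
    PySem.Set.ofList (v ++ [c]) =
      if c ∈ v then PySem.Set.ofList v else PySem.Set.ofList v ++ [c] := by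
  simpa [PySem.List.dedup_eq_ofList] using dedup_append_singleton v c

theorem get?_mapKeyed (keys : List String) (f : String → List String) (K : String) :
    (PySem.Dict.mk (keys.map (fun k => (k, f k)))).get? K =
      if K ∈ keys then some (f K) else none := by
  induction keys with
  | nil => rfl
  | cons h t ih =>
    simp only [List.map_cons, PySem.Dict.get?_mk_cons]
    by_cases hh : h = K
    · subst hh; simp
    · rw [if_neg (by simpa using hh), ih]
      by_cases hm : K ∈ t <;> simp [hm, Ne.symm hh]

theorem contains_mapKeyed (keys : List String) (f : String → List String) (K : String) :
    (PySem.Dict.mk (keys.map (fun k => (k, f k)))).contains K = decide (K ∈ keys) := by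
  rw [PySem.Dict.contains_eq_isSome_get?, get?_mapKeyed]
  by_cases hm : K ∈ keys <;> simp [hm]

theorem get?_mk_append_not_mem (l l2 : List (String × List String)) (K : String)
    (h : ∀ p ∈ l, p.1 ≠ K) :
    (PySem.Dict.mk (l ++ l2)).get? K = (PySem.Dict.mk l2).get? K := by
  induction l with
  | nil => rfl
  | cons p t ih =>
    obtain ⟨k0, v0⟩ := p
    rw [List.cons_append, PySem.Dict.get?_mk_cons]
    rw [if_neg (by simpa using h (k0, v0) (List.mem_cons_self))]
    exact ih (fun q hq => h q (List.mem_cons_of_mem _ hq))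

theorem foll_append (ts : List (String × String × String)) (t : String × String × String)
    (k : String) :
    foll (ts ++ [t]) k = foll ts k ++ (if tKey t == k then [t.2.2] else []) := by
  simp only [foll, List.filter_append, List.map_append]
  by_cases h : (tKey t == k) = true <;> simp [List.filter, h]

theorem foll_nil_of_not_mem (ts : List (String × String × String)) (K : String)
    (h : K ∉ ts.map tKey) : foll ts K = [] := by
  unfold foll
  rw [List.filter_eq_nil_iff.mpr ?_]
  · rfl
  · intro t ht
    simp only [beq_iff_eq]
    exact fun he => h (he ▸ List.mem_map_of_mem (f := tKey) ht)

theorem trigStepA_gItems (ts : List (String × String × String)) (t : String × String × String) :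
    trigStepA (PySem.Dict.mk (gItems ts)) t = PySem.Dict.mk (gItems (ts ++ [t])) := by
  have hgnew : gItems (ts ++ [t]) =
      (PySem.Set.add (PySem.List.dedup (ts.map tKey)) (tKey t)).map
        (fun k => (k, PySem.List.dedup
          (foll ts k ++ (if tKey t == k then [t.2.2] else [])))) := by
    simp only [gItems, List.map_append, List.map_cons, List.map_nil, dedup_append_elt]
    exact List.map_congr_left (fun k _ => by rw [foll_append])
  by_cases hK : tKey t ∈ ts.map tKey
  · -- key already present
    have hKd : tKey t ∈ PySem.List.dedup (ts.map tKey) := (PySem.List.mem_dedup _ _).mpr hK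
    have hcontS : PySem.Set.contains (PySem.List.dedup (ts.map tKey)) (tKey t) = true := by
      show (PySem.List.dedup (ts.map tKey)).contains (tKey t) = true
      exact List.contains_iff_mem.mpr hKd
    have hadd : PySem.Set.add (PySem.List.dedup (ts.map tKey)) (tKey t)
        = PySem.List.dedup (ts.map tKey) := by
      unfold PySem.Set.add
      rw [hcontS, if_pos rfl]
    have hcont : (PySem.Dict.mk (gItems ts)).contains (tKey t) = true := by
      rw [gItems, contains_mapKeyed]; exact decide_eq_true hKd
    have hget : (PySem.Dict.mk (gItems ts)).getD (tKey t) [] =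
        PySem.List.dedup (foll ts (tKey t)) := by
      rw [PySem.Dict.getD_eq_get?_getD, gItems, get?_mapKeyed, if_pos hKd]; rfl
    simp only [trigStepA, PySem.Dict.setdefault_of_contains _ _ hcont, hget]
    rw [hgnew, hadd]
    by_cases hc : t.2.2 ∈ foll ts (tKey t)
    · rw [if_pos ((PySem.List.mem_dedup _ _).mpr hc)]
      apply PySem.Dict.ext
      show gItems ts = _
      unfold gItems
      refine (List.map_congr_left (fun k _ => ?_))
      by_cases hk : tKey t = k
      · subst hk; simp [ofList_append_singleton, hc]
      · simp [hk]
    · rw [if_neg (fun hm => hc ((PySem.List.mem_dedup _ _).mp hm))]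
      apply PySem.Dict.ext
      rw [PySem.Dict.items_insert_of_contains _ _ hcont]
      show (gItems ts).map _ = _
      unfold gItems
      rw [List.map_map]
      refine (List.map_congr_left (fun k _ => ?_))
      by_cases hk : tKey t = k
      · subst hk; simp [ofList_append_singleton, hc]
      · have h2 : ¬k = tKey t := fun he => hk he.symm
        have h1 : (k == tKey t) = false := by simpa using h2
        simp [h2, hk]
  · -- fresh key
    have hKd : tKey t ∉ PySem.List.dedup (ts.map tKey) :=
      fun h => hK ((PySem.List.mem_dedup _ _).mp h)
    have hcontS : PySem.Set.contains (PySem.List.dedup (ts.map tKey)) (tKey t) = false := by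
      show (PySem.List.dedup (ts.map tKey)).contains (tKey t) = false
      exact Bool.eq_false_iff.mpr (fun h => hKd (List.contains_iff_mem.mp h))
    have hadd : PySem.Set.add (PySem.List.dedup (ts.map tKey)) (tKey t)
        = PySem.List.dedup (ts.map tKey) ++ [tKey t] := by
      unfold PySem.Set.add
      rw [hcontS, if_neg Bool.false_ne_true]
    have hnot1 : ∀ p ∈ gItems ts, p.1 ≠ tKey t := by
      intro p hp
      unfold gItems at hp
      obtain ⟨k, hk, rfl⟩ := List.mem_map.mp hp
      exact fun h => hKd (h ▸ hk)
    have hcont : (PySem.Dict.mk (gItems ts)).contains (tKey t) = false := by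
      rw [gItems, contains_mapKeyed]; exact decide_eq_false hKd
    have hd1 : (PySem.Dict.mk (gItems ts)).insert (tKey t) [] =
        PySem.Dict.mk (gItems ts ++ [(tKey t, [])]) := by
      apply PySem.Dict.ext
      rw [PySem.Dict.items_insert_of_not_contains _ _ hcont]
    simp only [trigStepA, PySem.Dict.setdefault_of_not_contains _ _ hcont, hd1]
    have hget1 : (PySem.Dict.mk (gItems ts ++ [(tKey t, [])])).getD (tKey t) [] = [] := by
      rw [PySem.Dict.getD_eq_get?_getD, get?_mk_append_not_mem _ _ _ hnot1,
          PySem.Dict.get?_mk_cons]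
      simp
    rw [hget1, if_neg (by simp), List.nil_append]
    have hcont2 : (PySem.Dict.mk (gItems ts ++ [(tKey t, [])])).contains (tKey t) = true := by
      rw [PySem.Dict.contains_eq_isSome_get?, get?_mk_append_not_mem _ _ _ hnot1,
          PySem.Dict.get?_mk_cons]
      simp
    apply PySem.Dict.ext
    rw [PySem.Dict.items_insert_of_contains _ _ hcont2]
    show (gItems ts ++ [(tKey t, [])]).map _ = gItems (ts ++ [t])
    rw [hgnew, hadd, List.map_append, List.map_append, List.map_cons, List.map_nil,
        List.map_cons, List.map_nil]
    refine congrArg₂ _ ?_ ?_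
    · unfold gItems
      rw [List.map_map]
      refine List.map_congr_left (fun k hk => ?_)
      have hkne : k ≠ tKey t := fun h => hKd (h ▸ hk)
      have hk1 : (k == tKey t) = false := by simpa using hkne
      have hk2 : (tKey t == k) = false := by simpa using Ne.symm hkne
      simp [Function.comp_apply, hk2, hkne]
    · rw [foll_nil_of_not_mem ts (tKey t) hK]
      simp [PySem.Set.ofList, PySem.Set.add, PySem.Set.contains]

theorem foldA_eq (ts : List (String × String × String)) :
    ts.foldl trigStepA PySem.Dict.empty = PySem.Dict.mk (gItems ts) := by
  induction ts using List.reverseRecOn with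
  | nil => rfl
  | append_singleton ts t ih =>
    rw [List.foldl_append, List.foldl_cons, List.foldl_nil, ih, trigStepA_gItems]

def trigAt (wl : List String) (k : Nat) : String × String × String :=
  (wl.getD k "", wl.getD (k + 1) "", wl.getD (k + 2) "")

theorem triples_eq (wl : List String) :
    wl.zip ((PySem.List.slice wl (some 1) none).zip (PySem.List.slice wl (some 2) none)) =
      (List.range (wl.length - 2)).map (trigAt wl) := by
  have h1 : PySem.List.slice wl (some 1) none = wl.drop 1 := by
    rw [show (1 : Int) = ((1 : Nat) : Int) by norm_num, PySem.List.slice_from_natCast]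
  have h2 : PySem.List.slice wl (some 2) none = wl.drop 2 := by
    rw [show (2 : Int) = ((2 : Nat) : Int) by norm_num, PySem.List.slice_from_natCast]
  rw [h1, h2]
  apply List.ext_getElem
  · simp [List.length_zip, List.length_drop]; omega
  · intro i hi hj
    simp only [List.getElem_zip, List.getElem_drop, List.getElem_map, List.getElem_range, trigAt]
    simp only [List.length_map, List.length_range] at hj
    have hlen : i + 2 < wl.length := by omega
    rw [List.getD_eq_getElem wl "" (by omega), List.getD_eq_getElem wl "" (by omega),
        List.getD_eq_getElem wl "" (by omega)]
    simp [Nat.add_comm]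

theorem rangeA_eq (wl : List String) :
    PySem.List.pyRange 0 ((wl.length : Int) - 2) 1 =
      (List.range (wl.length - 2)).map (Nat.cast : Nat → Int) := by
  rw [PySem.List.pyRange_one]
  have : ((wl.length : Int) - 2 - 0).toNat = wl.length - 2 := by omega
  rw [this]
  apply List.map_congr_left
  intro k _
  omega

theorem bodyA_eq (wl : List String) (k : Nat) (hk : k < wl.length - 2)
    (d : PySem.Dict String (List String)) :
    (let word_pair := PySem.Str.join " " (PySem.List.slice wl (some (k : Int)) (some ((k : Int) + 2)))
     let d1 := d.setdefault word_pair []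
     let trigram_list := d1.getD word_pair []
     if PySem.List.pyGetD wl ((k : Int) + 2) "" ∈ trigram_list then d1
     else d1.insert word_pair (trigram_list ++ [PySem.List.pyGetD wl ((k : Int) + 2) ""])) =
    trigStepA d (trigAt wl k) := by
  have hlen : k + 2 < wl.length := by omega
  have hget : PySem.List.pyGetD wl ((k : Int) + 2) "" = wl.getD (k + 2) "" := by
    rw [show ((k : Int) + 2) = ((k + 2 : Nat) : Int) by push_cast; ring, PySem.List.pyGetD_natCast]
  have hslice : PySem.List.slice wl (some (k : Int)) (some ((k : Int) + 2)) =
      [wl.getD k "", wl.getD (k + 1) ""] := by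
    rw [show ((k : Int) + 2) = ((k : Nat) : Int) + ((2 : Nat) : Int) by norm_num,
        PySem.List.slice_natCast_add]
    rw [List.drop_eq_getElem_cons (by omega : k < wl.length),
        List.drop_eq_getElem_cons (by omega : k + 1 < wl.length)]
    rw [List.getD_eq_getElem wl "" (by omega : k < wl.length),
        List.getD_eq_getElem wl "" (by omega : k + 1 < wl.length)]
    rfl
  simp only [hget, hslice, trigStepA, trigAt, tKey]

-- ===== VERDICT (by name: the statement is the Claim_ definition above) =====
theorem create_trigram_dict_spec : Claim_equal_create_trigram_dict := by
  intro wl _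
  unfold Spec_create_trigram_dict
  have hA : create_trigram_dict wl =
      (((List.range (wl.length - 2)).map (trigAt wl)).foldl trigStepA PySem.Dict.empty).items := by
    unfold create_trigram_dict
    rw [rangeA_eq, List.foldl_map, List.foldl_map]
    congr 1
    apply PySem.List.foldl_congr_mem
    intro d k hk
    exact bodyA_eq wl k (List.mem_range.mp hk) d
  have hB : create_trigram_dict_alt wl =
      gItems ((List.range (wl.length - 2)).map (trigAt wl)) := by
    unfold create_trigram_dict_alt
    rw [triples_eq]
    rfl
  rw [hA, hB, foldA_eq]
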